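-- pv_equiv track=rewrite | github.com/rahulpmishra/ml-foundations | week1/check_broadcasting.py | check_broadcast
-- ===== SOURCE A (Python) =====
-- def check_broadcast(a,b):
--   a = a.copy()
--   b = b.copy()
--   if len(a)>len(b):
--     for _ in range(len(a)-len(b)):
--       b.insert(0,1)
--   else:
--     for _ in range(len(b)-len(a)):
--       a.insert(0,1)
--
--
--   for i,v in enumerate(b):
--       if v==1:
--         b[i] = a[i]
--
--   for i,v in enumerate(a):
--       if v==1:
--         a[i] = b[i]
--
--   return a==b
-- ===== SOURCE B (Python) =====
-- def check_broadcast(a, b):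
--     ra = a[::-1]
--     rb = b[::-1]
--     for i in range(max(len(ra), len(rb))):
--         x = ra[i] if i < len(ra) else 1
--         y = rb[i] if i < len(rb) else 1
--         if x != y and x != 1 and y != 1:
--             return False
--     return True
-- ===== Notes on version B (the rewrite author's own statement) =====
-- stated objective: simpler
-- what changed: B replaces A's copy-pad-then-two-mutating-rewrite-passes-then-list-compare with a single non-mutating right-aligned pass that pairs dimensions from the back (implicit fill 1) and returns False at the first incompatible pair.
import Mathlib
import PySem

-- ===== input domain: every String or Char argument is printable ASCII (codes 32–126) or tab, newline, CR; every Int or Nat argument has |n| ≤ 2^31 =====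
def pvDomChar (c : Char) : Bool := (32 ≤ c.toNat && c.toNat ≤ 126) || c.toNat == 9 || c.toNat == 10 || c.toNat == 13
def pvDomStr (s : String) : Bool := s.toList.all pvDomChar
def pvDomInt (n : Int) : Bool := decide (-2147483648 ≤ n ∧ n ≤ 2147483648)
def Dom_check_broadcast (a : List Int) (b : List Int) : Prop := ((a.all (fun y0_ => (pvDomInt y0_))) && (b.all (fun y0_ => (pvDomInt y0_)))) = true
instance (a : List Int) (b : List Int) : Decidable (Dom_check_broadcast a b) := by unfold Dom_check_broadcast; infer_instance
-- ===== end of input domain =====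

-- B checks broadcast compatibility in one right-aligned non-mutating pass (fill 1) instead of A's pad + two mutating rewrite passes + list compare; objective: simpler.


-- ===== PORT A =====
-- the loop 'for _ in range(n): xs.insert(0,1)'
def padOnes : Nat → List Int → List Int
  | 0, xs => xs
  | n + 1, xs => padOnes n (1 :: xs)

-- 'for i,v in enumerate(b): if v==1: b[i] = a[i]' — index-aligned rewrite of b using a
def rewritePass : List Int → List Int → List Int
  | [], _ => []
  | v :: bs, av :: as_ => (if v = 1 then av else v) :: rewritePass bs as_
  | v :: bs, [] => v :: rewritePass bs []

def check_broadcast (a : List Int) (b : List Int) : Bool :=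
  let ab :=
    if a.length > b.length then (a, padOnes (a.length - b.length) b)
    else (padOnes (b.length - a.length) a, b)
  let a' := ab.1
  let b' := ab.2
  let b2 := rewritePass b' a'
  let a2 := rewritePass a' b2
  decide (a2 = b2)

-- ===== PORT B =====
-- pair dimensions from the back (lists are pre-reversed), missing dimension filled with 1
def bcastOk (x y : Int) : Bool := decide (x = y) || decide (x = 1) || decide (y = 1)

def revChk : List Int → List Int → Bool
  | [], [] => true
  | x :: xs, [] => bcastOk x 1 && revChk xs []
  | [], y :: ys => bcastOk 1 y && revChk [] ys
  | x :: xs, y :: ys => bcastOk x y && revChk xs ys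

def check_broadcast_alt (a : List Int) (b : List Int) : Bool :=
  revChk a.reverse b.reverse

-- ===== PRECONDITION & SPEC =====
def Spec_check_broadcast (a : List Int) (b : List Int) (out : Bool) : Prop := out = check_broadcast_alt a b
instance (a : List Int) (b : List Int) (out : Bool) : Decidable (Spec_check_broadcast a b out) := by unfold Spec_check_broadcast; infer_instance

-- ===== CLAIM (what is proved, stated in full; the proofs are below) =====
def Claim_equal_check_broadcast : Prop := ∀ (a : List Int) (b : List Int), Dom_check_broadcast a b → Spec_check_broadcast a b (check_broadcast a b)

-- ===== LEMMAS AND PROOFS =====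

lemma padOnes_eq_replicate (n : Nat) (xs : List Int) :
    padOnes n xs = List.replicate n 1 ++ xs := by
  induction n generalizing xs with
  | zero => simp [padOnes]
  | succ n ih =>
    simp [padOnes, ih, List.replicate_succ', List.append_assoc]

-- A's two rewrite passes followed by '==' compute exactly the compatibility check, on equal-length lists
lemma rewrite_eq_revChk (u v : List Int) (h : u.length = v.length) :
    decide (rewritePass u (rewritePass v u) = rewritePass v u) = revChk u v := by
  induction u generalizing v with
  | nil =>
    cases v with
    | nil => simp [rewritePass, revChk]
    | cons y ys => simp at h
  | cons x xs ih =>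
    cases v with
    | nil => simp at h
    | cons y ys =>
      simp only [List.length_cons, Nat.add_right_cancel_iff] at h
      simp only [rewritePass, revChk, ← ih ys h]
      by_cases hy : y = 1 <;> by_cases hx : x = 1
      · simp [hx, hy, bcastOk]
      · simp [hx, hy, bcastOk]
      · simp [hx, hy, bcastOk]
      · by_cases hxy : x = y <;> simp [hx, hy, hxy, bcastOk]

-- a side consisting only of (filled-in) 1s is compatible with anything
lemma revChk_nil_left (ys : List Int) : revChk [] ys = true := by
  induction ys with
  | nil => simp [revChk]
  | cons y ys ih => simp [revChk, bcastOk, ih]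

lemma revChk_nil_right (xs : List Int) : revChk xs [] = true := by
  induction xs with
  | nil => simp [revChk]
  | cons x xs ih => simp [revChk, bcastOk, ih]

lemma revChk_ones_left (n : Nat) (ys : List Int) : revChk (List.replicate n 1) ys = true := by
  induction n generalizing ys with
  | zero => exact revChk_nil_left ys
  | succ n ih =>
    cases ys with
    | nil => exact revChk_nil_right _
    | cons y ys => simp [List.replicate_succ, revChk, bcastOk, ih]

lemma revChk_ones_right (n : Nat) (xs : List Int) : revChk xs (List.replicate n 1) = true := by
  induction n generalizing xs with
  | zero => exact revChk_nil_right xs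
  | succ n ih =>
    cases xs with
    | nil => exact revChk_nil_left _
    | cons x xs => simp [List.replicate_succ, revChk, bcastOk, ih]

-- appending trailing 1-fills on the shorter (reversed) side does not change revChk
lemma revChk_pad_left (xs ys : List Int) (n : Nat) (h : xs.length + n = ys.length) :
    revChk (xs ++ List.replicate n 1) ys = revChk xs ys := by
  induction xs generalizing ys with
  | nil => rw [List.nil_append, revChk_ones_left, revChk_nil_left]
  | cons x xs ih =>
    cases ys with
    | nil => simp at h
    | cons y ys =>
      simp only [List.length_cons] at h
      simp [revChk, ih ys (by omega)]

lemma revChk_pad_right (xs ys : List Int) (n : Nat) (h : ys.length + n = xs.length) :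
    revChk xs (ys ++ List.replicate n 1) = revChk xs ys := by
  induction ys generalizing xs with
  | nil => rw [List.nil_append, revChk_ones_right, revChk_nil_right]
  | cons y ys ih =>
    cases xs with
    | nil => simp at h
    | cons x xs =>
      simp only [List.length_cons] at h
      simp [revChk, ih xs (by omega)]

-- on equal-length lists the back-to-front check equals the front-to-back check
lemma revChk_snoc (xs ys : List Int) (x y : Int) (h : xs.length = ys.length) :
    revChk (xs ++ [x]) (ys ++ [y]) = (bcastOk x y && revChk xs ys) := by
  induction xs generalizing ys with
  | nil =>
    cases ys with
    | nil => simp [revChk]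
    | cons _ _ => simp at h
  | cons a as ih =>
    cases ys with
    | nil => simp at h
    | cons b bs =>
      simp only [List.length_cons, Nat.add_right_cancel_iff] at h
      simp only [List.cons_append, revChk, ih bs h]
      rw [Bool.and_left_comm]

lemma revChk_reverse (xs ys : List Int) (h : xs.length = ys.length) :
    revChk xs.reverse ys.reverse = revChk xs ys := by
  induction xs generalizing ys with
  | nil =>
    cases ys with
    | nil => rfl
    | cons _ _ => simp at h
  | cons x xs ih =>
    cases ys with
    | nil => simp at h
    | cons y ys =>
      simp only [List.length_cons, Nat.add_right_cancel_iff] at h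
      simp only [List.reverse_cons, revChk]
      rw [revChk_snoc _ _ _ _ (by simp [h]), ih ys h]

-- ===== VERDICT (by name: the statement is the Claim_ definition above) =====
theorem check_broadcast_spec : Claim_equal_check_broadcast := by
  intro a b _
  unfold Spec_check_broadcast check_broadcast check_broadcast_alt
  by_cases hlen : a.length > b.length
  · simp only [hlen, if_true]
    rw [rewrite_eq_revChk a (padOnes (a.length - b.length) b)
          (by simp [padOnes_eq_replicate]; omega)]
    rw [← revChk_reverse a (padOnes (a.length - b.length) b)
          (by simp [padOnes_eq_replicate]; omega)]
    rw [padOnes_eq_replicate, List.reverse_append, List.reverse_replicate]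
    exact revChk_pad_right _ _ _ (by simp; omega)
  · simp only [hlen, if_false]
    rw [rewrite_eq_revChk (padOnes (b.length - a.length) a) b
          (by simp [padOnes_eq_replicate]; omega)]
    rw [← revChk_reverse (padOnes (b.length - a.length) a) b
          (by simp [padOnes_eq_replicate]; omega)]
    rw [padOnes_eq_replicate, List.reverse_append, List.reverse_replicate]
    exact revChk_pad_left _ _ _ (by simp; omega)
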